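-- pv_equiv track=rewrite | github.com/MrBrantCode/unitest_baseline | mut_generate/mist_train_cf/cf_89528/solution.py | sum_arrays
-- ===== SOURCE A (Python) =====
-- def sum_arrays(arr1, arr2):
--     # Find the lengths of the two arrays
--     len1 = len(arr1)
--     len2 = len(arr2)
--
--     # Find the minimum length between the two arrays
--     min_len = min(len1, len2)
--
--     # Create an empty array to store the sums
--     new_array = []
--
--     # Iterate through the elements of the arrays up to the minimum length
--     for i in range(min_len):
--         # Find the sum of the corresponding elements and append it to the new array
--         new_element = arr1[i] + arr2[i]
--         new_array.append(min(100, new_element))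
--
--     # Check if arr1 has remaining elements
--     if len1 > len2:
--         # Iterate through the remaining elements of arr1
--         for i in range(min_len, len1):
--             # Append the remaining elements to the new array
--             new_element = min(100, arr1[i])
--
--             # Check if the sum of all elements in the new array exceeds 1000
--             if sum(new_array) + new_element > 1000:
--                 break
--
--             new_array.append(new_element)
--
--     # Check if arr2 has remaining elements
--     if len2 > len1:
--         # Iterate through the remaining elements of arr2
--         for i in range(min_len, len2):
--             # Append the remaining elements to the new array
--             new_element = min(100, arr2[i])
--
--             # Check if the sum of all elements in the new array exceeds 1000
--             if sum(new_array) + new_element > 1000: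
--                 break
--
--             new_array.append(new_element)
--
--     return new_array
-- ===== SOURCE B (Python) =====
-- def sum_arrays(arr1, arr2):
--     # Prefix: capped pairwise sums over the common length.
--     prefix = [min(100, a + b) for a, b in zip(arr1, arr2)]
--     # Tail: capped leftover elements of the longer array.
--     longer = arr1 if len(arr1) >= len(arr2) else arr2
--     tail = [min(100, x) for x in longer[len(prefix):]]
--     # Single cutoff computation: first index whose running total exceeds 1000.
--     run = sum(prefix)
--     cut = len(tail)
--     for i, t in enumerate(tail):
--         run += t
--         if run > 1000:
--             cut = i
--             break
--     return prefix + tail[:cut]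
-- ===== Notes on version B (the rewrite author's own statement) =====
-- stated objective: simpler
-- what changed: Replaces A's three loops (index loop plus two symmetric tail loops that recompute sum(new_array) each iteration) with a zip-based prefix, one precomputed capped tail of the longer array, and a single running-sum cutoff scan followed by a slice.
import Mathlib
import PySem

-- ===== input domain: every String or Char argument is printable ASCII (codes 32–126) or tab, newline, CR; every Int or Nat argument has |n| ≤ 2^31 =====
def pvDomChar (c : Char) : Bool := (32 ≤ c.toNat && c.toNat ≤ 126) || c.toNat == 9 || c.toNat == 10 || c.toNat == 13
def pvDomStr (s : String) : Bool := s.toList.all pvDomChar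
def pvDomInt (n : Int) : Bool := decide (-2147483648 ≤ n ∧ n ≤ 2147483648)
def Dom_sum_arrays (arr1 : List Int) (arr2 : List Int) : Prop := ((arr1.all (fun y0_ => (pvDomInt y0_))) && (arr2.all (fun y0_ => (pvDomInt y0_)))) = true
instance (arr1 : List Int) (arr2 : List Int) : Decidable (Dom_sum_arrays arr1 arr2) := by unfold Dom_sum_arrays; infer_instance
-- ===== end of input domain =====

-- B replaces A's three loops (two symmetric tail branches recomputing sum(new_array))
-- by a zip prefix, one capped tail and a single running-sum cutoff scan; objective: simpler.

-- ===== PORT A =====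
-- tail loop of A: for i in idxs: ne = min(100, arr[i]); if sum(acc)+ne > 1000: break; acc.append(ne)
def sumArraysTailA (arr : List Int) : List Int → List Int → List Int
  | [], acc => acc
  | i :: rest, acc =>
    let ne := min 100 (PySem.List.pyGetD arr i 0)   -- arr[i]; i is always in range here
    if acc.sum + ne > 1000 then acc
    else sumArraysTailA arr rest (acc ++ [ne])

def sum_arrays (arr1 : List Int) (arr2 : List Int) : List Int :=
  let len1 : Int := arr1.length
  let len2 : Int := arr2.length
  let minLen : Int := min len1 len2
  -- for i in range(min_len): new_array.append(min(100, arr1[i] + arr2[i]))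
  let newArray := (PySem.List.pyRange 0 minLen 1).foldl
    (fun acc i => acc ++ [min 100 (PySem.List.pyGetD arr1 i 0 + PySem.List.pyGetD arr2 i 0)]) []
  let newArray := if len1 > len2 then sumArraysTailA arr1 (PySem.List.pyRange minLen len1 1) newArray else newArray
  let newArray := if len2 > len1 then sumArraysTailA arr2 (PySem.List.pyRange minLen len2 1) newArray else newArray
  newArray

-- ===== PORT B =====
-- cut scan: first index i with run + tail[i] > 1000 (default: tail's length)
def sumArraysCut : Int → List Int → Nat → Nat
  | _, [], n => n
  | run, t :: rest, i => if run + t > 1000 then i else sumArraysCut (run + t) rest (i + 1)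

def sum_arrays_alt (arr1 : List Int) (arr2 : List Int) : List Int :=
  let pref := (List.zip arr1 arr2).map (fun p => min 100 (p.1 + p.2))
  let longer := if arr1.length ≥ arr2.length then arr1 else arr2
  -- longer[len(pref):] with a nonnegative index is exactly List.drop
  let tail := (longer.drop pref.length).map (fun x => min 100 x)
  let cut := sumArraysCut pref.sum tail 0
  pref ++ tail.take cut

-- ===== PRECONDITION & SPEC =====
def Spec_sum_arrays (arr1 : List Int) (arr2 : List Int) (out : List Int) : Prop := out = sum_arrays_alt arr1 arr2
instance (arr1 : List Int) (arr2 : List Int) (out : List Int) : Decidable (Spec_sum_arrays arr1 arr2 out) := by unfold Spec_sum_arrays; infer_instance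

-- ===== CLAIM (what is proved, stated in full; the proofs are below) =====
def Claim_equal_sum_arrays : Prop := ∀ (arr1 : List Int) (arr2 : List Int), Dom_sum_arrays arr1 arr2 → Spec_sum_arrays arr1 arr2 (sum_arrays arr1 arr2)

-- ===== LEMMAS AND PROOFS =====

-- common greedy shape both tail computations reduce to
def greedyTail : Int → List Int → List Int
  | _, [] => []
  | run, t :: rest => if run + t > 1000 then [] else t :: greedyTail (run + t) rest

lemma sumArraysTailA_eq_greedy (arr : List Int) (idxs : List Int) (acc : List Int) :
    sumArraysTailA arr idxs acc
      = acc ++ greedyTail acc.sum (idxs.map (fun i => min 100 (PySem.List.pyGetD arr i 0))) := by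
  induction idxs generalizing acc with
  | nil => simp [sumArraysTailA, greedyTail]
  | cons i rest ih =>
    simp only [sumArraysTailA, greedyTail, List.map_cons]
    split_ifs with h
    · simp
    · rw [ih]; simp [List.sum_append]

lemma le_sumArraysCut (run : Int) (l : List Int) (i : Nat) : i ≤ sumArraysCut run l i := by
  induction l generalizing run i with
  | nil => simp [sumArraysCut]
  | cons t rest ih =>
    simp only [sumArraysCut]
    split_ifs
    · omega
    · have := ih (run + t) (i + 1); omega

lemma take_sumArraysCut (run : Int) (tail : List Int) :
    tail.take (sumArraysCut run tail 0) = greedyTail run tail := by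
  suffices h : ∀ (run : Int) (tail : List Int) (i : Nat),
      tail.take (sumArraysCut run tail i - i) = greedyTail run tail by
    simpa using h run tail 0
  intro run tail
  induction tail generalizing run with
  | nil => intro i; simp [sumArraysCut, greedyTail]
  | cons t rest ih =>
    intro i
    simp only [sumArraysCut, greedyTail]
    split_ifs with h
    · simp
    · have hge : i + 1 ≤ sumArraysCut (run + t) rest (i + 1) := le_sumArraysCut _ _ _
      have : sumArraysCut (run + t) rest (i + 1) - i
            = (sumArraysCut (run + t) rest (i + 1) - (i + 1)) + 1 := by omega
      rw [this, List.take_succ_cons, ih (run + t) (i + 1)]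

-- A's pref foldl is B's zip-map
lemma prefA_eq_zip (arr1 arr2 : List Int) :
    (PySem.List.pyRange 0 (min (arr1.length : Int) (arr2.length : Int)) 1).foldl
      (fun acc i => acc ++ [min 100 (PySem.List.pyGetD arr1 i 0 + PySem.List.pyGetD arr2 i 0)]) []
    = (List.zip arr1 arr2).map (fun p => min 100 (p.1 + p.2)) := by
  rw [PySem.List.foldl_append_singleton_eq_map]
  have hmin : (min (arr1.length : Int) (arr2.length : Int))
      = ((min arr1.length arr2.length : Nat) : Int) := by push_cast; rfl
  rw [hmin, PySem.List.pyRange_zero_natCast]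
  rw [show min arr1.length arr2.length = (List.zip arr1 arr2).length by simp]
  rw [List.map_map]
  apply List.ext_getElem
  · simp
  · intro k h1 h2
    have hk1 : k < arr1.length := by simp at h1; omega
    have hk2 : k < arr2.length := by simp at h1; omega
    simp only [List.nil_append, List.getElem_map, List.getElem_range, List.getElem_zip,
      Function.comp_apply, PySem.List.pyGetD_natCast]
    simp [List.getD, hk1, hk2]

-- the index map over a trailing range is the dropped tail, capped
lemma map_idx_eq_drop (arr : List Int) (m : Nat) :
    (PySem.List.pyRange (m : Int) (arr.length : Int) 1).map
        (fun i => min 100 (PySem.List.pyGetD arr i 0))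
      = (arr.drop m).map (fun x => min 100 x) := by
  have h := PySem.List.map_pyGetD_pyRange' arr 0 (Int.natCast_nonneg (n := m))
  rw [Int.toNat_natCast] at h
  rw [← h, List.map_map]
  simp [Function.comp]

-- ===== VERDICT (by name: the statement is the Claim_ definition above) =====
theorem sum_arrays_spec : Claim_equal_sum_arrays := by
  intro arr1 arr2 _
  unfold Spec_sum_arrays sum_arrays sum_arrays_alt
  simp only []
  rw [prefA_eq_zip]
  set pref := (List.zip arr1 arr2).map (fun p => min 100 (p.1 + p.2)) with hpre
  have hlenp : pref.length = min arr1.length arr2.length := by simp [hpre]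
  rcases lt_trichotomy arr1.length arr2.length with h | h | h
  · -- arr2 longer
    have h1 : ¬ ((arr1.length : Int) > (arr2.length : Int)) := by exact_mod_cast not_lt.mpr h.le
    have h2 : ((arr2.length : Int) > (arr1.length : Int)) := by exact_mod_cast h
    have hge : ¬ (arr1.length ≥ arr2.length) := not_le.mpr h
    rw [if_neg h1, if_pos h2, if_neg hge]
    have hmin : min (arr1.length : Int) (arr2.length : Int) = ((arr1.length : Nat) : Int) := by
      omega
    rw [hmin, sumArraysTailA_eq_greedy, map_idx_eq_drop, ← take_sumArraysCut]
    have : arr1.length = pref.length := by omega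
    rw [this]
  · -- equal lengths
    have h1 : ¬ ((arr1.length : Int) > (arr2.length : Int)) := by omega
    have h2 : ¬ ((arr2.length : Int) > (arr1.length : Int)) := by omega
    have hge : arr1.length ≥ arr2.length := h.ge
    rw [if_neg h1, if_neg h2, if_pos hge]
    have hd : arr1.drop pref.length = [] := by
      apply List.drop_eq_nil_of_le; omega
    simp [hd, sumArraysCut]
  · -- arr1 longer
    have h1 : ((arr1.length : Int) > (arr2.length : Int)) := by exact_mod_cast h
    have h2 : ¬ ((arr2.length : Int) > (arr1.length : Int)) := by omega
    have hge : arr1.length ≥ arr2.length := h.le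
    rw [if_neg h2, if_pos h1, if_pos hge]
    have hmin : min (arr1.length : Int) (arr2.length : Int) = ((arr2.length : Nat) : Int) := by
      omega
    have hlen2 : arr2.length = pref.length := by omega
    rw [hmin, hlen2, sumArraysTailA_eq_greedy, map_idx_eq_drop, ← take_sumArraysCut]
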